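-- pv_equiv track=rewrite | github.com/Datahel/gliner-text-anonymizer | text_anonymizer/gliner_anonymizer.py | combine_details
-- ===== SOURCE A (Python) =====
-- from typing import Optional, List, Dict, Any, Set
--
-- def combine_details(details_list: List[Dict[str, List[str]]]) -> Dict[str, List[str]]:
--     """
--     Combine multiple details dictionaries into a single aggregated collection.
--
--     Args:
--         details_list: List of details dicts from multiple anonymize() calls
--
--     Returns:
--         Combined dictionary with aggregated entity text lists
--     """
--     combined = {}
--     for details in details_list:
--         if details:
--             for entity_type, entities in details.items():
--                 if entity_type not in combined:
--                     combined[entity_type] = []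
--                 combined[entity_type].extend(entities)
--     return combined
-- ===== SOURCE B (Python) =====
-- from typing import List, Dict
--
-- def combine_details(details_list: List[Dict[str, List[str]]]) -> Dict[str, List[str]]:
--     keys = list(dict.fromkeys(k for d in details_list if d for k in d))
--     return {k: [e for d in details_list if d and k in d for e in d[k]] for k in keys}
-- ===== Notes on version B (the rewrite author's own statement) =====
-- stated objective: alternative
-- what changed: Replaces the sequential dict accumulation (create-key-then-extend per pair) by a two-phase decomposition: first compute the ordered distinct key list, then build the result by a per-key gathering pass over the dict list.
import Mathlib
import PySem

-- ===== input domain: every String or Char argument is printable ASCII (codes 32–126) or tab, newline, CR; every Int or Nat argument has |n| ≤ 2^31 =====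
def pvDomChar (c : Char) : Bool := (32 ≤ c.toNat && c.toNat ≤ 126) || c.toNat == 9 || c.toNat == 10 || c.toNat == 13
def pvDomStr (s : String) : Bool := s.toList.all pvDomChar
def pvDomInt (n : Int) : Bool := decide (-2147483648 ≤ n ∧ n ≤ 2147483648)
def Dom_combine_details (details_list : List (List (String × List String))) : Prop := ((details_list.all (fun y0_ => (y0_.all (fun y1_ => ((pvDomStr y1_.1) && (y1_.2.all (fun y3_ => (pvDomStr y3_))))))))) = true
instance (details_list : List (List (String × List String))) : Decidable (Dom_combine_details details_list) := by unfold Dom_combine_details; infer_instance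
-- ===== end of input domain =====

-- B replaces A's single sequential dict accumulation by a two-phase decomposition
-- (ordered distinct-key list first, then a per-key gathering pass); objective: alternative.

-- ===== PORT A =====
-- body of A's inner loop: 'if entity_type not in combined: combined[entity_type] = []'
-- then 'combined[entity_type].extend(entities)'
def combineStep (c : PySem.Dict String (List String)) (p : String × List String) :
    PySem.Dict String (List String) :=
  let c' := if c.contains p.1 then c else c.insert p.1 []
  c'.insert p.1 (c'.getD p.1 [] ++ p.2)

def combine_details (details_list : List (List (String × List String))) : List (String × List String) :=
  (details_list.foldl (fun c d => if d.isEmpty then c else d.foldl combineStep c)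
    PySem.Dict.empty).items

-- ===== PORT B =====
def combine_details_alt (details_list : List (List (String × List String))) : List (String × List String) :=
  -- keys = list(dict.fromkeys(k for d in details_list if d for k in d))
  let keys : List String :=
    PySem.Set.ofList ((details_list.filter (fun d => !d.isEmpty)).flatMap (fun d => d.map (·.1)))
  -- {k: [e for d in details_list if d and k in d for e in d[k]] for k in keys}
  keys.map (fun k =>
    (k, details_list.flatMap (fun d =>
         if !d.isEmpty && (PySem.Dict.mk d).contains k
         then ((PySem.Dict.mk d).get? k).getD [] else [])))

-- ===== PRECONDITION & SPEC =====
-- Pre_ excludes association lists carrying a duplicate key inside one inner dict: those do not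
-- represent Python dicts (the dict constructor collapses them), so the corner is an artefact of
-- the List encoding, on which A's extend-all-matches and B's first-match values are both defensible.
def Pre_combine_details (details_list : List (List (String × List String))) : Prop :=
  ∀ d ∈ details_list, (d.map (·.1)).Nodup
instance (details_list : List (List (String × List String))) : Decidable (Pre_combine_details details_list) := by unfold Pre_combine_details; infer_instance

def pvWitness_combine_details : (List (List (String × List String))) :=
  [[("a", ["x"])], [], [("b", []), ("a", ["y"])]]

def Spec_combine_details (details_list : List (List (String × List String))) (out : List (String × List String)) : Prop := out = combine_details_alt details_list
instance (details_list : List (List (String × List String))) (out : List (String × List String)) : Decidable (Spec_combine_details details_list out) := by unfold Spec_combine_details; infer_instance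

-- ===== CLAIM (what is proved, stated in full; the proofs are below) =====
def Claim_equal_combine_details : Prop := ∀ (details_list : List (List (String × List String))), Dom_combine_details details_list → Pre_combine_details details_list → Spec_combine_details details_list (combine_details details_list)

-- ===== LEMMAS AND PROOFS =====

-- A's create-then-extend pair of statements is a single insert
theorem combineStep_eq (c : PySem.Dict String (List String)) (p : String × List String) :
    combineStep c p = c.insert p.1 (c.getD p.1 [] ++ p.2) := by
  unfold combineStep
  by_cases h : c.contains p.1
  · simp [h]
  · simp only [h, if_false, Bool.false_eq_true]
    rw [PySem.Dict.getD_insert_self, PySem.Dict.insert_insert_self,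
      PySem.Dict.getD_of_not_contains _ _ (by simpa using h)]

theorem foldl_step_eq (F : List (String × List String)) (c : PySem.Dict String (List String)) :
    F.foldl combineStep c = F.foldl (fun c p => c.insert p.1 (c.getD p.1 [] ++ p.2)) c := by
  induction F generalizing c with
  | nil => rfl
  | cons p t ih => simp [combineStep_eq, ih]

-- A's outer loop over the dict list equals one fold over the flattened pair list
theorem foldA_flatten (l : List (List (String × List String))) (c : PySem.Dict String (List String)) :
    l.foldl (fun c d => if d.isEmpty then c else d.foldl combineStep c) c
      = l.flatten.foldl combineStep c := by
  induction l generalizing c with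
  | nil => rfl
  | cons d t ih =>
    simp only [List.foldl_cons, List.flatten_cons, List.foldl_append]
    cases d with
    | nil => simpa using ih c
    | cons p tl => simpa using ih _

theorem getD_foldA (F : List (String × List String)) (c : PySem.Dict String (List String))
    (k : String) :
    (F.foldl combineStep c).getD k []
      = c.getD k [] ++ ((F.filter (fun p => p.1 == k)).map (·.2)).flatten := by
  induction F generalizing c with
  | nil => simp
  | cons p t ih =>
    simp only [List.foldl_cons, ih, combineStep_eq, List.filter_cons]
    by_cases h : p.1 = k
    · subst h
      simp [PySem.Dict.getD_insert_self]
    · have hb : (p.1 == k) = false := by simpa using h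
      rw [PySem.Dict.getD_insert_of_ne _ _ _ (Ne.symm h)]
      simp [hb]

theorem keys_foldA (F : List (String × List String)) :
    (F.foldl combineStep PySem.Dict.empty).keys = PySem.Set.ofList (F.map (·.1)) := by
  rw [foldl_step_eq, PySem.Dict.keys_foldl_insert_key]
  simp [PySem.Set.update_nil_left, PySem.Dict.keys_empty]

theorem nodup_keys_foldA (F : List (String × List String)) :
    (F.foldl combineStep PySem.Dict.empty).keys.Nodup := by
  rw [foldl_step_eq]
  exact PySem.Dict.nodup_keys_foldl_insert_key _ _ _ _ PySem.Dict.nodup_keys_empty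

-- B's keys generator: the empty-dict filter is a no-op under flatMap
theorem keysB_eq (l : List (List (String × List String))) :
    (l.filter (fun d => !d.isEmpty)).flatMap (fun d => d.map (·.1)) = l.flatten.map (·.1) := by
  induction l with
  | nil => rfl
  | cons d t ih =>
    cases d with
    | nil => simpa using ih
    | cons p tl => simp [ih]

-- the '!d.isEmpty' half of B's guard is redundant given the containment test
theorem if_empty_contains (t : List (String × List String)) (k : String) :
    (if !t.isEmpty && (PySem.Dict.mk t).contains k
     then ((PySem.Dict.mk t).get? k).getD [] else [])
      = (if (PySem.Dict.mk t).contains k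
         then ((PySem.Dict.mk t).get? k).getD [] else []) := by
  cases t with
  | nil => simp [PySem.Dict.contains_mk]
  | cons q tt => simp only [List.isEmpty_cons, Bool.not_false, Bool.true_and]

-- B's per-dict lookup equals the filtered pair contribution, for nodup keys
theorem dlem' (d : List (String × List String)) (hnd : (d.map (·.1)).Nodup) (k : String) :
    (if (PySem.Dict.mk d).contains k then ((PySem.Dict.mk d).get? k).getD [] else [])
      = ((d.filter (fun p => p.1 == k)).map (·.2)).flatten := by
  induction d with
  | nil => simp [PySem.Dict.contains_mk]
  | cons p t ih =>
    obtain ⟨a, v⟩ := p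
    simp only [List.map_cons, List.nodup_cons] at hnd
    by_cases h : a = k
    · subst h
      have ht : t.filter (fun q => q.1 == a) = [] := by
        apply List.filter_eq_nil_iff.mpr
        intro q hq hqk
        exact hnd.1 (List.mem_map.mpr ⟨q, hq, (by simpa using hqk)⟩)
      simp [PySem.Dict.contains_mk, PySem.Dict.get?_mk_cons, ht]
    · have hb : (a == k) = false := beq_eq_false_iff_ne.mpr h
      simp only [PySem.Dict.contains_mk, List.any_cons, PySem.Dict.get?_mk_cons, List.filter_cons]
      rw [hb]
      simpa [PySem.Dict.contains_mk] using ih hnd.2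

theorem gatherB_eq (l : List (List (String × List String)))
    (h : ∀ d ∈ l, (d.map (·.1)).Nodup) (k : String) :
    (l.flatMap (fun d =>
      if !d.isEmpty && (PySem.Dict.mk d).contains k
      then ((PySem.Dict.mk d).get? k).getD [] else []))
      = ((l.flatten.filter (fun p => p.1 == k)).map (·.2)).flatten := by
  induction l with
  | nil => rfl
  | cons d t ih =>
    simp only [List.flatMap_cons, List.flatten_cons, List.filter_append, List.map_append,
      List.flatten_append]
    rw [if_empty_contains, dlem' d (h d (by simp)) k, ih (fun d hd => h d (by simp [hd]))]

-- ===== VERDICT (by name: the statement is the Claim_ definition above) =====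
theorem combine_details_spec : Claim_equal_combine_details := by
  intro l _ hpre
  unfold Spec_combine_details combine_details combine_details_alt
  rw [foldA_flatten]
  rw [PySem.Dict.items_eq_map_keys _ (nodup_keys_foldA l.flatten) []]
  rw [keys_foldA, keysB_eq]
  apply List.map_congr_left
  intro k _
  rw [getD_foldA, gatherB_eq l hpre k]
  simp
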